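-- pv_equiv track=rewrite | github.com/minreiseah/codeit_suisse | myapp/routes/rubiks.py | process_ops
-- ===== SOURCE A (Python) =====
-- def process_ops(s):
--     res = []
--     counter = 0
--     length = len(s)
--     while(counter < length):
--         if(length - counter == 1):
--             res.append(s[counter])
--             break
--         elif(s[counter + 1] == 'i'):
--             res.append(s[counter : counter+2])
--             counter += 2
--         else:
--             res.append(s[counter])
--             counter += 1
--     return res
-- ===== SOURCE B (Python) =====
-- import re
--
-- def process_ops(s):
--     return re.findall(r'.i?', s, re.S)
-- ===== Notes on version B (the rewrite author's own statement) =====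
-- stated objective: idiomatic
-- what changed: Replaces the manual index/counter while-loop with a single regex tokenizer re.findall(r'.i?', s, re.S), letting the regex engine group each character with an optional following 'i'.
import Mathlib
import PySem

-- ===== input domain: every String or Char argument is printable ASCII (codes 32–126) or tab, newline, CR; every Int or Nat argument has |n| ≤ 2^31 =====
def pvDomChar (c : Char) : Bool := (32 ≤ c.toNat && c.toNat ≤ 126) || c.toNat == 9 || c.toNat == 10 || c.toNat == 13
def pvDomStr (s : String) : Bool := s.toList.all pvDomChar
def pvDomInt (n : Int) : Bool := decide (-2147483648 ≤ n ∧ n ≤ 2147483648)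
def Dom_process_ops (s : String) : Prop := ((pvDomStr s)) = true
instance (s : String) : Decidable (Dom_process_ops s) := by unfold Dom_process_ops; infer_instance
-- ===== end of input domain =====

-- B replaces A's manual index/counter while-loop with a one-line regex tokenizer
-- (re.findall(r'.i?', s, re.S)); objective: idiomatic, same cost.

-- ===== PORT A =====
-- A's while-loop over indices, transliterated as recursion on the counter.
def pvALoop (cs : List Char) (counter : Nat) : List String :=
  if h : counter < cs.length then
    if cs.length - counter = 1 then
      [String.ofList [cs[counter]]]                                -- res.append(s[counter]); break
    else if cs[counter + 1]? = some 'i' then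
      String.ofList ((cs.drop counter).take 2) :: pvALoop cs (counter + 2)  -- s[counter:counter+2]
    else
      String.ofList [cs[counter]] :: pvALoop cs (counter + 1)      -- s[counter]
  else []
termination_by cs.length - counter

def process_ops (s : String) : List String := pvALoop s.toList 0

-- ===== PORT B =====
-- Hand port of the regex r'.i?' (DOTALL): one arbitrary char, then an optional 'i',
-- matched greedily left to right — exact for this pattern.
def pvBTok : List Char → List String
  | [] => []
  | a :: 'i' :: rest => String.ofList [a, 'i'] :: pvBTok rest
  | a :: rest => String.ofList [a] :: pvBTok rest

def process_ops_alt (s : String) : List String := pvBTok s.toList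

-- ===== PRECONDITION & SPEC =====
def Spec_process_ops (s : String) (out : List String) : Prop := out = process_ops_alt s
instance (s : String) (out : List String) : Decidable (Spec_process_ops s out) := by unfold Spec_process_ops; infer_instance

-- ===== CLAIM (what is proved, stated in full; the proofs are below) =====
def Claim_equal_process_ops : Prop := ∀ (s : String), Dom_process_ops s → Spec_process_ops s (process_ops s)

-- ===== LEMMAS AND PROOFS =====

theorem pvBTok_cons₂ (a b : Char) (l : List Char) (hb : b ≠ 'i') :
    pvBTok (a :: b :: l) = String.ofList [a] :: pvBTok (b :: l) := by
  rw [pvBTok.eq_def]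
  split
  · simp_all
  · simp_all
  · rename_i x a' rest' hno heq
    injection heq with h1 h2
    subst h1; subst h2
    rfl

theorem pvALoop_eq_pvBTok (cs : List Char) (c : Nat) :
    pvALoop cs c = pvBTok (cs.drop c) := by
  fun_induction pvALoop cs c with
  | case1 c h hone =>
    have h1 : cs.length ≤ c + 1 := by omega
    have hd : cs.drop c = cs[c] :: cs.drop (c + 1) := List.drop_eq_getElem_cons h
    have hnil : cs.drop (c + 1) = [] := List.drop_eq_nil_of_le h1
    rw [hd, hnil]
    simp [pvBTok]
  | case2 c h hone hi ih =>
    have h2 : c + 1 < cs.length := by omega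
    have hd : cs.drop c = cs[c] :: cs.drop (c + 1) := List.drop_eq_getElem_cons h
    have hd2 : cs.drop (c + 1) = cs[c + 1] :: cs.drop (c + 2) := List.drop_eq_getElem_cons h2
    have hi' : cs[c + 1] = 'i' := by
      have := hi; rw [List.getElem?_eq_getElem h2] at this; exact Option.some.inj this
    rw [ih, hd, hd2, hi']
    simp [pvBTok]
  | case3 c h hone hi ih =>
    have h2 : c + 1 < cs.length := by omega
    have hd : cs.drop c = cs[c] :: cs.drop (c + 1) := List.drop_eq_getElem_cons h
    have hd2 : cs.drop (c + 1) = cs[c + 1] :: cs.drop (c + 2) := List.drop_eq_getElem_cons h2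
    have hi' : cs[c + 1] ≠ 'i' := by
      intro e; apply hi; rw [List.getElem?_eq_getElem h2, e]
    rw [ih, hd, hd2, pvBTok_cons₂ _ _ _ hi']
  | case4 c h =>
    rw [List.drop_eq_nil_of_le (by omega : cs.length ≤ c)]
    rfl

-- ===== VERDICT (by name: the statement is the Claim_ definition above) =====
theorem process_ops_spec : Claim_equal_process_ops := by
  intro s _
  unfold Spec_process_ops process_ops process_ops_alt
  simpa using pvALoop_eq_pvBTok s.toList 0
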